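-- pv_equiv track=rewrite | github.com/MrBrantCode/unitest_baseline | mut_generate/mist_train_cf/cf_46871/solution.py | can_be_sorted
-- ===== SOURCE A (Python) =====
-- def can_be_sorted(data):
--     def check_sort(l):
--         for i in range(len(l)):
--             l_new = l[:i] + l[i+1:]
--             if l_new == sorted(l_new) or l_new == sorted(l_new, reverse=True):
--                 return True
--         return False
--
--     for l in data:
--         if not check_sort(l):
--             return False
--     return True
-- ===== SOURCE B (Python) =====
-- def can_be_sorted(data):
--     def _mono(l, cmp):
--         return all(cmp(a, b) for a, b in zip(l, l[1:]))
--
--     def _removable(l, cmp):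
--         # True iff deleting some single element leaves l monotone under cmp.
--         # At the first violating adjacent pair the deleted element must be one
--         # of the two; if there is no violation, deleting the last one works.
--         for j in range(len(l) - 1):
--             if not cmp(l[j], l[j + 1]):
--                 return _mono(l[:j] + l[j + 1:], cmp) or _mono(l[:j + 1] + l[j + 2:], cmp)
--         return True
--
--     le = lambda a, b: a <= b
--     ge = lambda a, b: a >= b
--     return all(bool(l) and (_removable(l, le) or _removable(l, ge)) for l in data)
-- ===== Notes on version B (the rewrite author's own statement) =====
-- stated objective: alternative
-- what changed: Instead of trying every deletion position and sorting each remainder, B scans once for the first adjacent pair violating the order; only deleting one of its two elements can help, so it checks just those two candidate remainders with a linear monotonicity test.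
import Mathlib
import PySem

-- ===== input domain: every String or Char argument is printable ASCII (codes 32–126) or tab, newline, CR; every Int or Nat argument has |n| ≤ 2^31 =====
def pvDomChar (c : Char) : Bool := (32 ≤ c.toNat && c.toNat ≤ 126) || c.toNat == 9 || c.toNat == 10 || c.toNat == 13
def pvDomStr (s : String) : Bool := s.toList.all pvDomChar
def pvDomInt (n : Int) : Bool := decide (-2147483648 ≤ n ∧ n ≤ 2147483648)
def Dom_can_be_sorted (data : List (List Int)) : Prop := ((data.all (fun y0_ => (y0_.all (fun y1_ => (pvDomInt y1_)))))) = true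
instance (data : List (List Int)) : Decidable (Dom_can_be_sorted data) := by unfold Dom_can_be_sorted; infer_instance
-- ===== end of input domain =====

-- B replaces A's try-every-deletion-and-sort check by a single scan for the first
-- out-of-order adjacent pair, testing only the two candidate deletions (alternative algorithm).

-- ===== PORT A =====
-- check_sort: for i in range(len(l)): l_new = l[:i] + l[i+1:];
--             if l_new == sorted(l_new) or l_new == sorted(l_new, reverse=True): return True
-- the early-returning for-loop over range is List.any over pyRange
def pvCheckSortA (l : List Int) : Bool :=
  (PySem.List.pyRange 0 (l.length : Int) 1).any fun i =>
    let lNew := PySem.List.slice l none (some i) ++ PySem.List.slice l (some (i + 1)) none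
    (lNew == PySem.List.sorted lNew (fun x => x)) || (lNew == PySem.List.sorted lNew (fun x => x) true)

-- for l in data: if not check_sort(l): return False / return True  — List.all
def can_be_sorted (data : List (List Int)) : Bool :=
  data.all fun l => pvCheckSortA l

-- ===== PORT B =====
-- _mono(l, cmp) = all(cmp(a, b) for a, b in zip(l, l[1:]))  (l[1:] = tail)
def pvMono (cmp : Int → Int → Bool) (l : List Int) : Bool :=
  (l.zip l.tail).all fun p => cmp p.1 p.2

-- the 'for j in range(len(l)-1)' loop of _removable: the scan reads l[j], l[j+1],
-- i.e. the head pair of the remaining suffix l[j:]; j is kept for the slices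
-- l[:j]+l[j+1:] and l[:j+1]+l[j+2:] taken at the first violation
def pvRemGo (cmp : Int → Int → Bool) (l : List Int) : List Int → Nat → Bool
  | a :: b :: t, j =>
      if cmp a b then pvRemGo cmp l (b :: t) (j + 1)
      else pvMono cmp (l.take j ++ b :: t) || pvMono cmp (l.take (j + 1) ++ t)
  | _, _ => true

def pvRemovable (cmp : Int → Int → Bool) (l : List Int) : Bool :=
  pvRemGo cmp l l 0

def can_be_sorted_alt (data : List (List Int)) : Bool :=
  data.all fun l =>
    (!l.isEmpty) && (pvRemovable (fun a b => decide (a ≤ b)) l || pvRemovable (fun a b => decide (b ≤ a)) l)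

-- ===== PRECONDITION & SPEC =====
def Spec_can_be_sorted (data : List (List Int)) (out : Bool) : Prop := out = can_be_sorted_alt data
instance (data : List (List Int)) (out : Bool) : Decidable (Spec_can_be_sorted data out) := by unfold Spec_can_be_sorted; infer_instance

-- ===== CLAIM (what is proved, stated in full; the proofs are below) =====
def Claim_equal_can_be_sorted : Prop := ∀ (data : List (List Int)), Dom_can_be_sorted data → Spec_can_be_sorted data (can_be_sorted data)

-- ===== LEMMAS AND PROOFS =====

-- the common specification of both per-list checks (for l ≠ []):
-- some single deletion leaves the list nondecreasing or nonincreasing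
def pvDelSpec (R : Int → Int → Prop) (l : List Int) : Prop :=
  ∃ k, k < l.length ∧ (l.eraseIdx k).Pairwise R

-- pvMono ↔ Pairwise, for a transitive boolean comparison
theorem pvMono_iff (cmp : Int → Int → Bool)
    (htrans : ∀ a b c, cmp a b = true → cmp b c = true → cmp a c = true)
    (l : List Int) : pvMono cmp l = true ↔ l.Pairwise (fun a b => cmp a b = true) := by
  induction l with
  | nil => simp [pvMono]
  | cons a tl ih =>
    cases tl with
    | nil => simp [pvMono]
    | cons b t =>
      constructor
      · intro h
        have h' : (cmp a b = true) ∧ pvMono cmp (b :: t) = true := by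
          simpa [pvMono] using h
        obtain ⟨hab, hrest⟩ := h'
        have hp := ih.mp hrest
        refine List.pairwise_cons.mpr ⟨?_, hp⟩
        intro x hx
        rcases List.mem_cons.mp hx with rfl | hx
        · exact hab
        · exact htrans _ _ _ hab ((List.pairwise_cons.mp hp).1 x hx)
      · intro hp
        obtain ⟨hall, hp'⟩ := List.pairwise_cons.mp hp
        have : (cmp a b = true) ∧ pvMono cmp (b :: t) = true :=
          ⟨hall b (by simp), ih.mpr hp'⟩
        simpa [pvMono] using this

theorem pvDelSpec_of_pairwise {R : Int → Int → Prop} {l : List Int} (hne : l ≠ [])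
    (hpl : l.Pairwise R) : pvDelSpec R l :=
  ⟨0, List.length_pos_of_ne_nil hne, List.Pairwise.sublist (List.eraseIdx_sublist l 0) hpl⟩

theorem pvRemGo_iff (cmp : Int → Int → Bool)
    (htrans : ∀ a b c, cmp a b = true → cmp b c = true → cmp a c = true)
    (l : List Int) (hne : l ≠ []) :
    ∀ suf j, l.drop j = suf → (l.take (j + 1)).Pairwise (fun a b => cmp a b = true) →
      (pvRemGo cmp l suf j = true ↔ pvDelSpec (fun a b => cmp a b = true) l) := by
  intro suf
  induction suf with
  | nil =>
    intro j hdrop hpre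
    have hlen : l.length ≤ j := by
      have := congrArg List.length hdrop
      simp at this; omega
    have hl : l.take (j + 1) = l := List.take_of_length_le (by omega)
    rw [hl] at hpre
    exact iff_of_true rfl (pvDelSpec_of_pairwise hne hpre)
  | cons a suf ih =>
    cases suf with
    | nil =>
      intro j hdrop hpre
      have hlen : l.length = j + 1 := by
        have := congrArg List.length hdrop
        simp at this; omega
      have hl : l.take (j + 1) = l := List.take_of_length_le (by omega)
      rw [hl] at hpre
      exact iff_of_true rfl (pvDelSpec_of_pairwise hne hpre)
    | cons b t =>
      intro j hdrop hpre
      have hlen : l.length = j + (t.length + 2) := by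
        have := congrArg List.length hdrop
        simp at this; omega
      have hj : j < l.length := by omega
      have hgeta : l[j]? = some a := by
        have : (l.drop j)[0]? = l[j + 0]? := List.getElem?_drop
        rw [hdrop] at this; simpa using this.symm
      have hdrop1 : l.drop (j + 1) = b :: t := by
        rw [← List.tail_drop, hdrop]; rfl
      have hgetb : l[j + 1]? = some b := by
        have : (l.drop (j + 1))[0]? = l[(j + 1) + 0]? := List.getElem?_drop
        rw [hdrop1] at this; simpa using this.symm
      have hdrop2 : l.drop (j + 2) = t := by
        have : l.drop (j + 1 + 1) = (l.drop (j + 1)).tail := List.tail_drop.symm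
        rw [hdrop1] at this; simpa using this
      have htake1 : l.take (j + 1) = l.take j ++ [a] := by
        rw [List.take_add_one, hgeta]; rfl
      have htake2 : l.take (j + 2) = l.take (j + 1) ++ [b] := by
        rw [show j + 2 = (j + 1) + 1 from rfl, List.take_add_one, hgetb]; rfl
      have herase_j : l.eraseIdx j = l.take j ++ b :: t := by
        rw [List.eraseIdx_eq_take_drop_succ, hdrop1]
      have herase_j1 : l.eraseIdx (j + 1) = l.take (j + 1) ++ t := by
        rw [List.eraseIdx_eq_take_drop_succ, show j + 1 + 1 = j + 2 from rfl, hdrop2]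
      by_cases h : cmp a b = true
      · -- no violation here: step to the next pair
        have hstep : pvRemGo cmp l (a :: b :: t) j = pvRemGo cmp l (b :: t) (j + 1) := by
          simp [pvRemGo, h]
        rw [hstep]
        apply ih (j + 1) hdrop1
        rw [htake2, List.pairwise_append]
        refine ⟨hpre, by simp, ?_⟩
        intro x hx y hy
        rw [List.mem_singleton] at hy; subst hy
        rw [htake1] at hx hpre
        rcases List.mem_append.mp hx with hx' | hx'
        · have hxa : cmp x a = true := by
            rw [List.pairwise_append] at hpre
            simpa using hpre.2.2 x hx' a (by simp)
          exact htrans _ _ _ hxa h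
        · rw [List.mem_singleton] at hx'; subst hx'; exact h
      · -- first violation at (a, b): only deleting index j or j+1 can help
        have hstep : pvRemGo cmp l (a :: b :: t) j =
            (pvMono cmp (l.take j ++ b :: t) || pvMono cmp (l.take (j + 1) ++ t)) := by
          simp [pvRemGo, h]
        rw [hstep, Bool.or_eq_true, pvMono_iff cmp htrans, pvMono_iff cmp htrans,
          ← herase_j, ← herase_j1]
        constructor
        · rintro (hp | hp)
          · exact ⟨j, hj, hp⟩
          · exact ⟨j + 1, by omega, hp⟩
        · rintro ⟨k, hk, hp⟩
          rcases lt_trichotomy k j with hkj | rfl | hkj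
          · -- k < j: the pair (a, b) stays adjacent, contradiction
            exfalso
            have hsub : (a :: b :: t).Sublist (l.eraseIdx k) := by
              have h1 : l.drop j = (l.drop (k + 1)).drop (j - (k + 1)) := by
                rw [List.drop_drop]; congr 1; omega
              have h2 : (a :: b :: t).IsSuffix (l.drop (k + 1)) := by
                rw [← hdrop, h1]; exact List.drop_suffix _ _
              have h3 : (l.drop (k + 1)).IsSuffix (l.eraseIdx k) := by
                rw [List.eraseIdx_eq_take_drop_succ]; exact List.suffix_append _ _
              exact (h2.trans h3).sublist
            have := List.Pairwise.sublist hsub hp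
            exact h ((List.pairwise_cons.mp this).1 b (by simp))
          · exact Or.inl hp
          · rcases Nat.lt_or_ge k (j + 2) with hk2 | hk2
            · have : k = j + 1 := by omega
              subst this; exact Or.inr hp
            · -- k ≥ j+2: the pair (a, b) stays adjacent in the prefix, contradiction
              exfalso
              have hsub : (l.take (j + 2)).Sublist (l.eraseIdx k) := by
                have h1 : l.take (j + 2) = (l.take k).take (j + 2) := by
                  rw [List.take_take]; congr 1; omega
                have h2 : (l.take k).IsPrefix (l.eraseIdx k) := by
                  rw [List.eraseIdx_eq_take_drop_succ]; exact List.prefix_append _ _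
                rw [h1]
                exact (List.take_prefix _ _).sublist.trans h2.sublist
              have hp2 := List.Pairwise.sublist hsub hp
              rw [htake2, List.pairwise_append] at hp2
              have hab : cmp a b = true := by
                have := hp2.2.2 a (by rw [htake1]; simp) b (by simp)
                exact this
              exact h hab

theorem pvRemovable_iff (cmp : Int → Int → Bool)
    (htrans : ∀ a b c, cmp a b = true → cmp b c = true → cmp a c = true)
    (l : List Int) (hne : l ≠ []) :
    pvRemovable cmp l = true ↔ pvDelSpec (fun a b => cmp a b = true) l := by
  have htk : (l.take 1).Pairwise (fun a b => cmp a b = true) := by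
    cases l with
    | nil => simp
    | cons x xs => simp
  exact pvRemGo_iff cmp htrans l hne l 0 rfl (by simpa using htk)

theorem pvSortedEq_iff (x : List Int) :
    (x == PySem.List.sorted x (fun y => y)) = true ↔ x.Pairwise (fun a b : Int => a ≤ b) := by
  rw [beq_iff_eq]
  constructor
  · intro h
    have hp := PySem.List.sorted_pairwise x (fun y => y)
    rw [← h] at hp
    exact hp
  · intro h
    exact (PySem.List.sorted_eq_self_of_pairwise x (fun y => y) h).symm

theorem pvSortedRevEq_iff (x : List Int) :
    (x == PySem.List.sorted x (fun y => y) true) = true ↔ x.Pairwise (fun a b : Int => b ≤ a) := by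
  rw [beq_iff_eq]
  constructor
  · intro h
    have hp := PySem.List.sorted_pairwise_rev x (fun y => y)
    rw [← h] at hp
    exact hp
  · intro h
    exact (PySem.List.sorted_rev_eq_self_of_pairwise x (fun y => y) h).symm

theorem pvSliceEq (l : List Int) (k : ℕ) :
    PySem.List.slice l none (some (k : ℤ)) ++ PySem.List.slice l (some ((k : ℤ) + 1)) none
      = l.eraseIdx k := by
  have hc : ((k : ℤ) + 1) = (((k + 1 : ℕ)) : ℤ) := by push_cast; ring
  rw [PySem.List.slice_to_natCast, hc, PySem.List.slice_from_natCast,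
    List.eraseIdx_eq_take_drop_succ]

theorem pvCheckSortA_iff (l : List Int) :
    pvCheckSortA l = true ↔ ∃ k, k < l.length ∧
      ((l.eraseIdx k).Pairwise (fun a b : Int => a ≤ b) ∨
       (l.eraseIdx k).Pairwise (fun a b : Int => b ≤ a)) := by
  unfold pvCheckSortA
  rw [List.any_eq_true]
  constructor
  · rintro ⟨i, hi, hcond⟩
    obtain ⟨h0, hlt⟩ := PySem.List.mem_pyRange_one.mp hi
    lift i to ℕ using h0 with k
    refine ⟨k, by exact_mod_cast hlt, ?_⟩
    simp only [pvSliceEq l k, Bool.or_eq_true, pvSortedEq_iff, pvSortedRevEq_iff] at hcond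
    exact hcond
  · rintro ⟨k, hk, hp⟩
    refine ⟨(k : ℤ), PySem.List.mem_pyRange_one.mpr ⟨by positivity, by exact_mod_cast hk⟩, ?_⟩
    simp only [pvSliceEq l k, Bool.or_eq_true, pvSortedEq_iff, pvSortedRevEq_iff]
    exact hp

theorem perList_eq (l : List Int) :
    pvCheckSortA l =
      ((!l.isEmpty) && (pvRemovable (fun a b => decide (a ≤ b)) l || pvRemovable (fun a b => decide (b ≤ a)) l)) := by
  cases l with
  | nil => rfl
  | cons x xs =>
    have hne : (x :: xs) ≠ [] := by simp
    have htransLe : ∀ a b c : Int, decide (a ≤ b) = true → decide (b ≤ c) = true →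
        decide (a ≤ c) = true := by intro a b c hab hbc; simp at *; omega
    have htransGe : ∀ a b c : Int, decide (b ≤ a) = true → decide (c ≤ b) = true →
        decide (c ≤ a) = true := by intro a b c hab hbc; simp at *; omega
    rw [Bool.eq_iff_iff, pvCheckSortA_iff]
    simp only [List.isEmpty_cons, Bool.not_false, Bool.true_and, Bool.or_eq_true,
      pvRemovable_iff _ htransLe _ hne, pvRemovable_iff _ htransGe _ hne,
      pvDelSpec, decide_eq_true_eq]
    constructor
    · rintro ⟨k, hk, hp | hp⟩
      · exact Or.inl ⟨k, hk, hp⟩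
      · exact Or.inr ⟨k, hk, hp⟩
    · rintro (⟨k, hk, hp⟩ | ⟨k, hk, hp⟩)
      · exact ⟨k, hk, Or.inl hp⟩
      · exact ⟨k, hk, Or.inr hp⟩

-- ===== VERDICT (by name: the statement is the Claim_ definition above) =====
theorem can_be_sorted_spec : Claim_equal_can_be_sorted := by
  intro data _
  unfold Spec_can_be_sorted can_be_sorted can_be_sorted_alt
  exact congrArg data.all (funext perList_eq)
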